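-- pv_equiv track=rewrite | github.com/leonardo-blas/psychological-steering | replication/scripts/sweeping_utils.py | compute_layers_suffix
-- ===== SOURCE A (Python) =====
-- def compute_layers_suffix(layer_groups, num_layers: int) -> str:
--     if len(layer_groups) == 1 and len(layer_groups[0]) == num_layers:
--         return "_-1"
--     all_layers = sorted({L for group in layer_groups for L in group})
--     if not all_layers:
--         return ""
--     ranges = []
--     start = all_layers[0]
--     prev = all_layers[0]
--     for L in all_layers[1:]:
--         if L == prev + 1:
--             prev = L
--         else:
--             ranges.append(f"{start}" if start == prev else f"{start}-{prev}")
--             start = L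
--             prev = L
--     ranges.append(f"{start}" if start == prev else f"{start}-{prev}")
--     return "_" + "_".join(ranges)
-- ===== SOURCE B (Python) =====
-- def compute_layers_suffix(layer_groups, num_layers: int) -> str:
--     if len(layer_groups) == 1 and len(layer_groups[0]) == num_layers:
--         return "_-1"
--     all_layers = sorted({L for group in layer_groups for L in group})
--     if not all_layers:
--         return ""
--     # within a run of consecutive integers, L - index is constant (and runs
--     # get strictly increasing keys), so bucket by that difference
--     runs = {}
--     for i, L in enumerate(all_layers):
--         k = L - i
--         if k in runs:
--             runs[k] = (runs[k][0], L)
--         else: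
--             runs[k] = (L, L)
--     parts = [f"{s}" if s == e else f"{s}-{e}" for s, e in runs.values()]
--     return "_" + "_".join(parts)
-- ===== Notes on version B (the rewrite author's own statement) =====
-- stated objective: alternative
-- what changed: Replaces A's start/prev state-machine scan with run detection by grouping the sorted distinct layers in a dict keyed by the constant value-minus-index of each consecutive run.
import Mathlib
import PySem

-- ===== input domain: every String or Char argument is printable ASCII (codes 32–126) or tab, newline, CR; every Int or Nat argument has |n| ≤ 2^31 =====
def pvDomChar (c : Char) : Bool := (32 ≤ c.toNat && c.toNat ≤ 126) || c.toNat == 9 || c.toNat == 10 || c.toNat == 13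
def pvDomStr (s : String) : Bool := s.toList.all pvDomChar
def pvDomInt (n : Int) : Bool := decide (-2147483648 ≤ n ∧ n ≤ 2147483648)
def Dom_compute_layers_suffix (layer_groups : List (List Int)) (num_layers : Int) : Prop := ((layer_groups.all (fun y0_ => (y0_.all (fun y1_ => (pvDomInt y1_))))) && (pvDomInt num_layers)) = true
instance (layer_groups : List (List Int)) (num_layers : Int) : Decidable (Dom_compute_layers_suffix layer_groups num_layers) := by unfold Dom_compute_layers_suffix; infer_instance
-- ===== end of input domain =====

-- B replaces A's start/prev state-machine scan with dict bucketing of the sorted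
-- distinct layers by value-minus-index (constant on each consecutive run); same
-- result, a genuinely different run-detection strategy (objective: alternative).

-- ===== PORT A =====
-- f"{start}" if start == prev else f"{start}-{prev}"
def fmtA (s p : Int) : String :=
  if s = p then PySem.Int.toStr s
  else PySem.Str.join "" [PySem.Int.toStr s, "-", PySem.Int.toStr p]

def compute_layers_suffix (layer_groups : List (List Int)) (num_layers : Int) : String :=
  if layer_groups.length = 1 ∧ ((layer_groups.headD []).length : Int) = num_layers then "_-1"
  else
    let all_layers := PySem.List.sorted (PySem.Set.ofList (layer_groups.flatMap (fun g => g))) (fun x => x) false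
    match all_layers with
    | [] => ""
    | a0 :: rest =>
      let st := rest.foldl
        (fun (st : List String × Int × Int) L =>
          if L = st.2.2 + 1 then (st.1, st.2.1, L)
          else (st.1 ++ [fmtA st.2.1 st.2.2], L, L))
        ([], a0, a0)
      let ranges := st.1 ++ [fmtA st.2.1 st.2.2]
      PySem.Str.join "" ["_", PySem.Str.join "_" ranges]

-- ===== PORT B =====
-- f"{s}" if s == e else f"{s}-{e}"
def fmtB (se : Int × Int) : String :=
  if se.1 = se.2 then PySem.Int.toStr se.1
  else PySem.Str.join "" [PySem.Int.toStr se.1, "-", PySem.Int.toStr se.2]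

-- the loop body: k = L - i; extend the run at k or open a new one
def bStep (d : PySem.Dict Int (Int × Int)) (p : Int × Int) : PySem.Dict Int (Int × Int) :=
  let k := p.2 - p.1
  if d.contains k then d.insert k ((d.getD k (0, 0)).1, p.2)
  else d.insert k (p.2, p.2)

def compute_layers_suffix_alt (layer_groups : List (List Int)) (num_layers : Int) : String :=
  if layer_groups.length = 1 ∧ ((layer_groups.headD []).length : Int) = num_layers then "_-1"
  else
    let all_layers := PySem.List.sorted (PySem.Set.ofList (layer_groups.flatMap (fun g => g))) (fun x => x) false
    if all_layers = [] then ""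
    else
      let runs := (PySem.List.enumerate all_layers).foldl bStep PySem.Dict.empty
      let parts := runs.values.map fmtB
      PySem.Str.join "" ["_", PySem.Str.join "_" parts]

-- ===== PRECONDITION & SPEC =====
def Spec_compute_layers_suffix (layer_groups : List (List Int)) (num_layers : Int) (out : String) : Prop := out = compute_layers_suffix_alt layer_groups num_layers
instance (layer_groups : List (List Int)) (num_layers : Int) (out : String) : Decidable (Spec_compute_layers_suffix layer_groups num_layers out) := by unfold Spec_compute_layers_suffix; infer_instance

-- ===== CLAIM (what is proved, stated in full; the proofs are below) =====
def Claim_equal_compute_layers_suffix : Prop := ∀ (layer_groups : List (List Int)) (num_layers : Int), Dom_compute_layers_suffix layer_groups num_layers → Spec_compute_layers_suffix layer_groups num_layers (compute_layers_suffix layer_groups num_layers)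

-- ===== LEMMAS AND PROOFS =====

-- runs of the strictly increasing tail t, with current run (key k = p - i + 1,
-- start s, prev p), next index i: the common reference decomposition
def runsK (i s p : Int) : List Int → List (Int × (Int × Int))
  | [] => [(p - i + 1, (s, p))]
  | L :: t =>
    if L = p + 1 then runsK (i + 1) s L t
    else (p - i + 1, (s, p)) :: runsK (i + 1) L L t

theorem aFold_eq_runsK (t : List Int) : ∀ (i s p : Int) (ranges : List String),
    (fun st => st.1 ++ [fmtA st.2.1 st.2.2])
      (t.foldl (fun (st : List String × Int × Int) L =>
          if L = st.2.2 + 1 then (st.1, st.2.1, L)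
          else (st.1 ++ [fmtA st.2.1 st.2.2], L, L)) (ranges, s, p))
    = ranges ++ (runsK i s p t).map (fun q => fmtA q.2.1 q.2.2) := by
  induction t with
  | nil => intro i s p ranges; simp [runsK]
  | cons L t ih =>
    intro i s p ranges
    simp only [List.foldl_cons, runsK]
    by_cases h : L = p + 1
    · simp only [h, if_true, ih (i + 1) s (p+1) ranges]
    · simp only [if_neg h, ih (i + 1) L L _, List.map_cons, List.append_assoc,
        List.singleton_append]

theorem bFold_eq_runsK (t : List Int) : ∀ (i s p : Int) (dpre : List (Int × (Int × Int))),
    List.IsChain (· < ·) (p :: t) →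
    (dpre.map Prod.fst ++ [p - i + 1]).Pairwise (· < ·) →
    ((PySem.List.enumerate t i).foldl bStep (PySem.Dict.mk (dpre ++ [(p - i + 1, (s, p))]))).items
    = dpre ++ runsK i s p t := by
  induction t with
  | nil => intro i s p dpre _ _; simp [PySem.List.enumerate_nil, runsK]
  | cons L t ih =>
    intro i s p dpre hch hso
    have hpL : p < L := (List.isChain_cons_cons.mp hch).1
    have hch' : List.IsChain (· < ·) (L :: t) := (List.isChain_cons_cons.mp hch).2
    have hkeys : (PySem.Dict.mk (dpre ++ [(p - i + 1, (s, p))])).keys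
        = dpre.map Prod.fst ++ [p - i + 1] := by
      simp [PySem.Dict.keys]
    have hnd : (PySem.Dict.mk (dpre ++ [(p - i + 1, (s, p))])).keys.Nodup := by
      rw [hkeys]; exact hso.nodup
    have hlt : ∀ q ∈ dpre, q.1 < p - i + 1 := by
      intro q hq
      have := (List.pairwise_append.mp hso).2.2
      exact this q.1 (List.mem_map_of_mem hq) _ (List.mem_singleton_self _)
    rw [PySem.List.enumerate_cons, List.foldl_cons]
    by_cases h : L = p + 1
    · -- same run: key L - i = p - i + 1, update in place
      have hk : L - i = p - i + 1 := by omega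
      have hcon : (PySem.Dict.mk (dpre ++ [(p - i + 1, (s, p))])).contains (L - i) = true := by
        rw [PySem.Dict.contains_eq_decide_mem_keys, hkeys, hk]
        simp
      have hget : (PySem.Dict.mk (dpre ++ [(p - i + 1, (s, p))])).getD (L - i) (0, 0) = (s, p) := by
        rw [hk]
        exact PySem.Dict.getD_of_mem_items _ (by simp) hnd (0, 0)
      have hins : bStep (PySem.Dict.mk (dpre ++ [(p - i + 1, (s, p))])) (i, L)
          = PySem.Dict.mk (dpre ++ [(L - (i + 1) + 1, (s, L))]) := by
        simp only [bStep, hcon, if_true, hget]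
        apply PySem.Dict.ext
        rw [PySem.Dict.items_insert_of_contains _ _ hcon]
        have hmap : ∀ q ∈ dpre, (if q.1 == L - i then (L - i, (s, L)) else q) = q := by
          intro q hq
          have hql : q.1 < p - i + 1 := hlt q hq
          have : ¬ ((q.1 == L - i) = true) := by simp only [beq_iff_eq]; omega
          simp [this]
        have h2 : L - (i + 1) + 1 = L - i := by omega
        show List.map _ (dpre ++ [(p - i + 1, (s, p))]) = _
        rw [List.map_append, List.map_congr_left hmap, List.map_id']
        simp only [List.map_cons, List.map_nil, ← hk, BEq.rfl, if_true, h2]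
      rw [hins]
      have hso' : (dpre.map Prod.fst ++ [L - (i + 1) + 1]).Pairwise (· < ·) := by
        have : L - (i + 1) + 1 = p - i + 1 := by omega
        rw [this]; exact hso
      rw [ih (i + 1) s L dpre hch' hso']
      have : runsK i s p (L :: t) = runsK (i + 1) s L t := by
        simp [runsK, h]
      rw [this]
    · -- new run: key L - i is fresh and larger than every existing key
      have hkgt : p - i + 1 < L - i := by omega
      have hcon : (PySem.Dict.mk (dpre ++ [(p - i + 1, (s, p))])).contains (L - i) = false := by
        rw [PySem.Dict.contains_eq_decide_mem_keys, hkeys]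
        simp only [decide_eq_false_iff_not, List.mem_append, List.mem_singleton, List.mem_map]
        rintro (⟨q, hq, hq1⟩ | hq)
        · have := hlt q hq; omega
        · omega
      have hins : bStep (PySem.Dict.mk (dpre ++ [(p - i + 1, (s, p))])) (i, L)
          = PySem.Dict.mk ((dpre ++ [(p - i + 1, (s, p))]) ++ [(L - (i + 1) + 1, (L, L))]) := by
        simp only [bStep, hcon, Bool.false_eq_true, if_false]
        apply PySem.Dict.ext
        rw [PySem.Dict.items_insert_of_not_contains _ _ hcon]
        have h2 : L - (i + 1) + 1 = L - i := by omega
        rw [h2]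
      rw [hins]
      have hso' : ((dpre ++ [(p - i + 1, (s, p))]).map Prod.fst ++ [L - (i + 1) + 1]).Pairwise (· < ·) := by
        have h2 : L - (i + 1) + 1 = L - i := by omega
        rw [List.map_append, h2]
        simp only [List.map_cons, List.map_nil]
        rw [List.pairwise_append]
        refine ⟨hso, List.pairwise_singleton _ _, ?_⟩
        intro a ha b hb
        rw [List.mem_singleton] at hb
        subst hb
        rcases List.mem_append.mp ha with h3 | h3
        · obtain ⟨q, hq, rfl⟩ := List.mem_map.mp h3
          have := hlt q hq; omega
        · rw [List.mem_singleton] at h3; omega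
      rw [ih (i + 1) L L (dpre ++ [(p - i + 1, (s, p))]) hch' hso']
      have : runsK i s p (L :: t) = (p - i + 1, (s, p)) :: runsK (i + 1) L L t := by
        simp [runsK, h]
      rw [this, List.append_assoc, List.singleton_append]

-- ===== VERDICT (by name: the statement is the Claim_ definition above) =====
theorem compute_layers_suffix_spec : Claim_equal_compute_layers_suffix := by
  intro lg n _
  unfold Spec_compute_layers_suffix
  simp only [compute_layers_suffix, compute_layers_suffix_alt]
  by_cases hg : lg.length = 1 ∧ ((lg.headD []).length : Int) = n
  · simp only [if_pos hg]
  · simp only [if_neg hg]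
    cases hxs : PySem.List.sorted (PySem.Set.ofList (lg.flatMap (fun g => g))) (fun x => x) false with
    | nil => simp
    | cons a0 rest =>
      have hpw : (a0 :: rest).Pairwise (· < ·) := by
        rw [← hxs]; exact PySem.List.sorted_ofList_pairwise_lt _
      have hch : List.IsChain (· < ·) (a0 :: rest) := hpw.isChain
      have h1 : bStep PySem.Dict.empty (0, a0) = PySem.Dict.mk ([] ++ [(a0 - 1 + 1, (a0, a0))]) := by
        simp only [bStep, PySem.Dict.contains_empty, Bool.false_eq_true, if_false]
        apply PySem.Dict.ext
        rw [PySem.Dict.items_insert_of_not_contains _ _ (PySem.Dict.contains_empty _)]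
        have h2 : a0 - 1 + 1 = a0 - 0 := by omega
        rw [h2]
        rfl
      have hB : ((PySem.List.enumerate (a0 :: rest) 0).foldl bStep PySem.Dict.empty).items
          = runsK 1 a0 a0 rest := by
        rw [PySem.List.enumerate_cons, List.foldl_cons, h1]
        have := bFold_eq_runsK rest 1 a0 a0 [] hch (by simp)
        simpa using this
      have hA := aFold_eq_runsK rest 1 a0 a0 []
      simp only [List.nil_append] at hA
      simp only [List.cons_ne_nil, if_false, PySem.Dict.values, hB]
      rw [hA, List.map_map]
      rfl
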